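-- pv_equiv track=rewrite | github.com/hailiang-wang/seq2seq-textsum | src/data_processor.py | solo_tnumber_utterance
-- ===== SOURCE A (Python) =====
-- def solo_tnumber_utterance(utterance):
--     '''
--     replace multiple TNUMBER with one TNUMBER
--     '''
--     tokens = utterance.split()
--     result = []
--     pre = None
--     for o in tokens:
--         if pre == "TNUMBER" and o == "TNUMBER":
--             pass
--         elif pre == "TNUMBER" and o != "TNUMBER":
--             result.append(o)
--         elif pre != "TNUMBER" and o == "TNUMBER":
--             result.append(o)
--             pre = "TNUMBER"
--         elif pre != "TNUMBER" and o != "TNUMBER":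
--             result.append(o)
--             pre = o
--     return " ".join(result)
-- ===== SOURCE B (Python) =====
-- def solo_tnumber_utterance(utterance):
--     '''
--     replace multiple TNUMBER with one TNUMBER
--     '''
--     tokens = utterance.split()
--     try:
--         first = tokens.index("TNUMBER")
--     except ValueError:
--         first = -1
--     return " ".join(t for i, t in enumerate(tokens) if t != "TNUMBER" or i == first)
-- ===== Notes on version B (the rewrite author's own statement) =====
-- stated objective: simpler
-- what changed: Replaces A's previous-token state machine (whose 'pre' flag is never reset, so only the first TNUMBER survives) by locating the first TNUMBER index once and keeping every token in one comprehension unless it is a later TNUMBER.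
import Mathlib
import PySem

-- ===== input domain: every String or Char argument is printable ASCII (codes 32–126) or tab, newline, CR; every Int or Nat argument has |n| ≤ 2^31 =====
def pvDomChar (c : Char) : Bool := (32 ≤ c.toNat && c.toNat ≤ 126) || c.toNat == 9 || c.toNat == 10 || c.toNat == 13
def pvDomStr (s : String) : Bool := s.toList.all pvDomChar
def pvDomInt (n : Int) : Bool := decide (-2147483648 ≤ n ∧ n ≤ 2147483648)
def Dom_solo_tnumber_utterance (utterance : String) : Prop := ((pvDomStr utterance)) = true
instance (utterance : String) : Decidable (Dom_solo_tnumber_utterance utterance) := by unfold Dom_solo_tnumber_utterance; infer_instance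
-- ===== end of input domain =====

-- B replaces A's previous-token state machine by locating the first TNUMBER index once and
-- filtering an enumerated comprehension; objective: simpler (same O(n) cost).

-- ===== PORT A =====
-- A's loop: state is the accumulated result list and 'pre' (None initially, the previous kept token).
def soloLoopA : List String → List String → Option String → List String
  | [], result, _ => result
  | o :: rest, result, pre =>
    if pre = some "TNUMBER" ∧ o = "TNUMBER" then
      soloLoopA rest result pre
    else if pre = some "TNUMBER" ∧ o ≠ "TNUMBER" then
      soloLoopA rest (result ++ [o]) pre
    else if pre ≠ some "TNUMBER" ∧ o = "TNUMBER" then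
      soloLoopA rest (result ++ [o]) (some "TNUMBER")
    else
      soloLoopA rest (result ++ [o]) (some o)

def solo_tnumber_utterance (utterance : String) : String :=
  let tokens := PySem.Str.split₀ utterance
  PySem.Str.join " " (soloLoopA tokens [] none)

-- ===== PORT B =====
def solo_tnumber_utterance_alt (utterance : String) : String :=
  let tokens := PySem.Str.split₀ utterance
  let first : Int := match PySem.List.index? tokens "TNUMBER" with
    | some i => (i : Int)
    | none => -1
  PySem.Str.join " "
    ((PySem.List.enumerate tokens).filterMap
      (fun p => if p.2 ≠ "TNUMBER" ∨ p.1 = first then some p.2 else none))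

-- ===== PRECONDITION & SPEC =====
def Spec_solo_tnumber_utterance (utterance : String) (out : String) : Prop := out = solo_tnumber_utterance_alt utterance
instance (utterance : String) (out : String) : Decidable (Spec_solo_tnumber_utterance utterance out) := by unfold Spec_solo_tnumber_utterance; infer_instance

-- ===== CLAIM (what is proved, stated in full; the proofs are below) =====
def Claim_equal_solo_tnumber_utterance : Prop := ∀ (utterance : String), Dom_solo_tnumber_utterance utterance → Spec_solo_tnumber_utterance utterance (solo_tnumber_utterance utterance)

-- ===== LEMMAS AND PROOFS =====

-- Common spec: keep each token unless a TNUMBER was already seen and the token is TNUMBER.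
def keepSpec : List String → Bool → List String
  | [], _ => []
  | o :: rest, seen =>
    if o = "TNUMBER" then
      if seen then keepSpec rest true else o :: keepSpec rest true
    else o :: keepSpec rest seen

theorem soloLoopA_eq_keepSpec (ts : List String) :
    ∀ (res : List String) (pre : Option String),
      soloLoopA ts res pre = res ++ keepSpec ts (decide (pre = some "TNUMBER")) := by
  induction ts with
  | nil => intro res pre; simp [soloLoopA, keepSpec]
  | cons o rest ih =>
    intro res pre
    by_cases hp : pre = some "TNUMBER" <;> by_cases ho : o = "TNUMBER" <;>
      simp [soloLoopA, keepSpec, hp, ho, ih]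

theorem filterEnum_eq_keepSpec (ts : List String) :
    ∀ (k : Nat) (first : Int) (seen : Bool),
      (seen = true → first < (k : Int)) →
      (seen = false → PySem.List.index? ts "TNUMBER" = none → first = -1) →
      (seen = false → ∀ i, PySem.List.index? ts "TNUMBER" = some i → first = ((k + i : Nat) : Int)) →
      (PySem.List.enumerate ts (k : Int)).filterMap
          (fun p => if p.2 ≠ "TNUMBER" ∨ p.1 = first then some p.2 else none)
        = keepSpec ts seen := by
  induction ts with
  | nil => intro k first seen _ _ _; simp [PySem.List.enumerate_nil, keepSpec]
  | cons o rest ih =>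
    intro k first seen hseen hnone hsome
    rw [PySem.List.enumerate_cons]
    have hk1 : ((k : Int) + 1) = ((k + 1 : Nat) : Int) := by push_cast; ring
    by_cases ho : o = "TNUMBER"
    · subst ho
      cases seen with
      | true =>
        have h1 : first < (k : Int) := hseen rfl
        have hf0 : (fun p : Int × String => if p.2 ≠ "TNUMBER" ∨ p.1 = first then some p.2 else none)
            (((k : Int)), "TNUMBER") = none := by
          simp only [ite_eq_right_iff]
          intro hc; rcases hc with hc | hc
          · exact absurd rfl hc
          · omega
        simp only [List.filterMap_cons, hf0]
        have hK : keepSpec ("TNUMBER" :: rest) true = keepSpec rest true := by simp [keepSpec]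
        rw [hK, hk1, ih (k + 1) first true (fun _ => by omega) (by simp) (by simp)]
      | false =>
        have hf : first = (k : Int) := by
          have := hsome rfl 0 (PySem.List.index?_cons_self _ _)
          simpa using this
        have hf0 : (fun p : Int × String => if p.2 ≠ "TNUMBER" ∨ p.1 = first then some p.2 else none)
            (((k : Int)), "TNUMBER") = some "TNUMBER" := by
          simp [hf]
        simp only [List.filterMap_cons, hf0]
        have hK : keepSpec ("TNUMBER" :: rest) false = "TNUMBER" :: keepSpec rest true := by
          simp [keepSpec]
        rw [hK, hk1, ih (k + 1) first true (fun _ => by omega) (by simp) (by simp)]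
    · have hf0 : (fun p : Int × String => if p.2 ≠ "TNUMBER" ∨ p.1 = first then some p.2 else none)
          (((k : Int)), o) = some o := by
        simp [ho]
      simp only [List.filterMap_cons, hf0]
      have hK : keepSpec (o :: rest) seen = o :: keepSpec rest seen := by
        simp [keepSpec, ho]
      rw [hK, hk1]
      cases seen with
      | true =>
        rw [ih (k + 1) first true (fun _ => by have := hseen rfl; omega) (by simp) (by simp)]
      | false =>
        refine congrArg (o :: ·) (ih (k + 1) first false (by simp) (fun _ hn => ?_) (fun _ i hi => ?_))
        · refine hnone rfl ?_
          rw [PySem.List.index?_cons_of_ne rest ho, hn]; rfl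
        · have := hsome rfl (i + 1) (by rw [PySem.List.index?_cons_of_ne rest ho, hi]; rfl)
          rw [this]; push_cast; ring

-- ===== VERDICT (by name: the statement is the Claim_ definition above) =====
theorem solo_tnumber_utterance_spec : Claim_equal_solo_tnumber_utterance := by
  intro utterance _
  unfold Spec_solo_tnumber_utterance solo_tnumber_utterance solo_tnumber_utterance_alt
  simp only
  rw [soloLoopA_eq_keepSpec]
  congr 1
  rw [show (0 : Int) = ((0 : Nat) : Int) from rfl]
  rw [filterEnum_eq_keepSpec (PySem.Str.split₀ utterance) 0 _ false (by simp)
      (fun _ hn => by rw [hn])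
      (fun _ i hi => by rw [hi]; simp)]
  simp
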